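-- pv_equiv track=rewrite | github.com/AniMazu/capstonesipsml | Deployments/service_files/score.py | HasMultipleSlash
-- ===== SOURCE A (Python) =====
-- def HasMultipleSlash(s):
--     s = str(s)
--     slashes = ['/','\\']
--     flag = False
--     for c in s:
--         if not flag and c in slashes:
--             flag = True
--         elif flag and c in slashes:
--             return True
--     return False
-- ===== SOURCE B (Python) =====
-- def HasMultipleSlash(s):
--     s = str(s)
--     return s.count('/') + s.count('\\') >= 2
-- ===== Notes on version B (the rewrite author's own statement) =====
-- stated objective: simpler
-- what changed: Replaced the stateful early-return flag scan with an aggregate formulation: count both slash kinds with str.count and compare the total to 2.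
import Mathlib
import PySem

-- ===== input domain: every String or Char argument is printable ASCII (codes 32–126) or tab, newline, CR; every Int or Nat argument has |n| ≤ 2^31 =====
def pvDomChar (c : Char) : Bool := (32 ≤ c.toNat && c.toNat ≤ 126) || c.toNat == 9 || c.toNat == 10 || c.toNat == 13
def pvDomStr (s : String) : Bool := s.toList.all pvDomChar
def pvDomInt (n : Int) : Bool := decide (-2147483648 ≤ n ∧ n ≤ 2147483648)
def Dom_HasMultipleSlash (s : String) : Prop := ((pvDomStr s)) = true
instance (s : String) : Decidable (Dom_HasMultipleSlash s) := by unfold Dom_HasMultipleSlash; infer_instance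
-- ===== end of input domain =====

-- B replaces A's stateful early-return flag scan with counting both slash kinds and comparing the total to 2 (simpler aggregate formulation).


-- ===== PORT A =====
-- the for-loop over the characters with the flag and the mid-loop 'return True'
def hmsLoop : List Char → Bool → Bool
  | [], _ => false
  | c :: rest, flag =>
    if !flag && (c == '/' || c == '\\') then hmsLoop rest true
    else if flag && (c == '/' || c == '\\') then true
    else hmsLoop rest flag

def HasMultipleSlash (s : String) : Bool := hmsLoop s.toList false

-- ===== PORT B =====
def HasMultipleSlash_alt (s : String) : Bool :=
  decide (2 ≤ PySem.Str.count s "/" + PySem.Str.count s "\\")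

-- ===== PRECONDITION & SPEC =====
def Spec_HasMultipleSlash (s : String) (out : Bool) : Prop := out = HasMultipleSlash_alt s
instance (s : String) (out : Bool) : Decidable (Spec_HasMultipleSlash s out) := by unfold Spec_HasMultipleSlash; infer_instance

-- ===== CLAIM (what is proved, stated in full; the proofs are below) =====
def Claim_equal_HasMultipleSlash : Prop := ∀ (s : String), Dom_HasMultipleSlash s → Spec_HasMultipleSlash s (HasMultipleSlash s)

-- ===== LEMMAS AND PROOFS =====

-- Chars.count with a one-character needle is List.count
theorem hms_go_singleton (c : Char) : ∀ (l : List Char) (fuel acc : Nat), l.length ≤ fuel →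
    PySem.Chars.count.go [c] fuel l acc = acc + l.count c := by
  intro l
  induction l with
  | nil => intro fuel acc h; cases fuel <;> simp [PySem.Chars.count.go]
  | cons h t ih =>
    intro fuel acc hle
    cases fuel with
    | zero => simp at hle
    | succ f =>
      rw [PySem.Chars.count.go]
      by_cases hc : h = c
      · simp [hc, List.isPrefixOf]
        rw [ih f (acc + 1) (by simpa using hle)]
        omega
      · simp [List.isPrefixOf, hc, Ne.symm hc]
        exact ih f acc (by simpa using hle)

theorem hms_count_singleton (l : List Char) (c : Char) :
    PySem.Chars.count l [c] = l.count c := by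
  simp [PySem.Chars.count]
  simpa using hms_go_singleton c l l.length 0 le_rfl

-- the flag machine computes "at least 2 slashes (minus a head start from the flag)"
theorem hmsLoop_eq_count (l : List Char) : ∀ (flag : Bool),
    hmsLoop l flag =
      decide (2 ≤ (if flag then 1 else 0) + l.count '/' + l.count '\\') := by
  induction l with
  | nil => intro flag; cases flag <;> simp [hmsLoop]
  | cons c rest ih =>
    intro flag
    by_cases hc : c = '/' ∨ c = '\\'
    · cases flag with
      | false =>
        have h1 : hmsLoop (c :: rest) false = hmsLoop rest true := by
          rcases hc with h | h <;> simp [hmsLoop, h]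
        rw [h1, ih true]
        rcases hc with h | h <;>
          · simp [h]; omega
      | true =>
        have h1 : hmsLoop (c :: rest) true = true := by
          rcases hc with h | h <;> simp [hmsLoop, h]
        rw [h1]
        rcases hc with h | h <;>
          · simp [h]; omega
    · rw [not_or] at hc
      have h1 : hmsLoop (c :: rest) flag = hmsLoop rest flag := by
        cases flag <;> simp [hmsLoop, hc.1, hc.2]
      rw [h1, ih flag]
      simp [hc.1, hc.2]

-- ===== VERDICT (by name: the statement is the Claim_ definition above) =====
theorem HasMultipleSlash_spec : Claim_equal_HasMultipleSlash := by
  intro s _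
  unfold Spec_HasMultipleSlash HasMultipleSlash HasMultipleSlash_alt
  rw [hmsLoop_eq_count s.toList false]
  simp [PySem.Str.count_eq, hms_count_singleton]
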